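-- pv_equiv track=rewrite | github.com/byhow/prax | python/bag_of_rice.py | maxSetSize
-- ===== SOURCE A (Python) =====
-- def maxSetSize(riceBags):
--     bag_list = sorted(riceBags)
--     max_len = -1
--
--     for i in range(len(bag_list)):
--         number = bag_list[i]
--         rice_set = [number]
--         for j in range(i + 1, len(bag_list)):
--             if number * number == bag_list[j]:
--
--                 rice_set.append(bag_list[j])
--                 number = bag_list[j]
--         if len(rice_set) < 2:
--             continue
--         if len(rice_set) > max_len:
--             max_len = len(rice_set)
--
--     return max_len
-- ===== SOURCE B (Python) =====
-- def maxSetSize(riceBags):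
--     cnt = {}
--     for v in riceBags:
--         cnt[v] = cnt.get(v, 0) + 1
--     best = -1
--     c0 = cnt.get(0, 0)
--     c1 = cnt.get(1, 0)
--     if c0 >= 2:
--         best = max(best, c0)
--     if c1 >= 2:
--         best = max(best, c1)
--     if -1 in cnt and c1 >= 1:
--         best = max(best, 1 + c1)
--     for x in cnt:
--         if -1 <= x <= 1:
--             continue
--         length = 1
--         y = x * x
--         while y in cnt:
--             length += 1
--             y = y * y
--         if length >= 2:
--             best = max(best, length)
--     return best
-- ===== Notes on version B (the rewrite author's own statement) =====
-- stated objective: faster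
-- what changed: Replaces the sort plus quadratic per-start rescans by a single counting pass over a hash map: square chains are followed by O(log log) membership tests, and the self-square values 0, 1 and the -1 -> 1 chain are handled by their counts.
import Mathlib
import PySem

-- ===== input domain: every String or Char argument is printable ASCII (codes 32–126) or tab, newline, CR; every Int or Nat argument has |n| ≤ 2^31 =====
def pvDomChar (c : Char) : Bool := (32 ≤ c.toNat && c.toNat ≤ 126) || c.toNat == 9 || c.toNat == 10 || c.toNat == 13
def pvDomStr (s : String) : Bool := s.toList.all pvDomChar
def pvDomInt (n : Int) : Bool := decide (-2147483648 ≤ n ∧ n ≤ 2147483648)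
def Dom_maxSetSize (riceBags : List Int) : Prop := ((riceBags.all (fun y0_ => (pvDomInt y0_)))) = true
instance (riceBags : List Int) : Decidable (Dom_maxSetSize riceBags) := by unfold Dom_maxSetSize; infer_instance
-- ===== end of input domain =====

-- B replaces A's sort + quadratic per-start rescans by one counting pass and hash-membership square chains
-- (0, 1 and -1 handled through their counts); objective: faster.

-- ===== PORT A =====
-- inner loop 'for j in range(i+1, len(bag_list))' over the remaining suffix, state (number, rice_set)
def pvInnerA : Int → List Int → List Int → List Int
  | _, riceSet, [] => riceSet
  | number, riceSet, a :: t =>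
    if number * number = a then pvInnerA a (riceSet ++ [a]) t else pvInnerA number riceSet t

-- outer loop 'for i in range(len(bag_list))': at step i, bag_list[i] is the head of the current suffix
def pvOuterA : List Int → Int → Int
  | [], maxLen => maxLen
  | x :: rest, maxLen =>
    let riceSet := pvInnerA x [x] rest
    pvOuterA rest
      (if (riceSet.length : Int) < 2 then maxLen
       else if maxLen < (riceSet.length : Int) then (riceSet.length : Int) else maxLen)

def maxSetSize (riceBags : List Int) : Int :=
  pvOuterA (PySem.List.sorted riceBags (fun x => x) false) (-1)

-- ===== PORT B =====
-- the 'while y in cnt' loop; fuel = number of keys of cnt is enough: the tested values strictly increase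
def pvWhileB (cnt : PySem.Dict Int Int) : Nat → Int → Int → Int
  | 0, length, _ => length
  | fuel + 1, length, y =>
    if cnt.contains y then pvWhileB cnt fuel (length + 1) (y * y) else length

def maxSetSize_alt (riceBags : List Int) : Int :=
  let cnt := riceBags.foldl (fun d v => d.insert v (d.getD v 0 + 1)) PySem.Dict.empty
  let c0 := cnt.getD 0 0
  let c1 := cnt.getD 1 0
  let best : Int := -1
  let best := if 2 ≤ c0 then max best c0 else best
  let best := if 2 ≤ c1 then max best c1 else best
  let best := if cnt.contains (-1) ∧ 1 ≤ c1 then max best (1 + c1) else best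
  cnt.keys.foldl (fun b x =>
    if -1 ≤ x ∧ x ≤ 1 then b
    else
      let length := pvWhileB cnt cnt.keys.length 1 (x * x)
      if 2 ≤ length then max b length else b) best

-- ===== PRECONDITION & SPEC =====
def Spec_maxSetSize (riceBags : List Int) (out : Int) : Prop := out = maxSetSize_alt riceBags
instance (riceBags : List Int) (out : Int) : Decidable (Spec_maxSetSize riceBags out) := by unfold Spec_maxSetSize; infer_instance

-- ===== CLAIM (what is proved, stated in full; the proofs are below) =====
def Claim_equal_maxSetSize : Prop := ∀ (riceBags : List Int), Dom_maxSetSize riceBags → Spec_maxSetSize riceBags (maxSetSize riceBags)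

-- ===== LEMMAS AND PROOFS =====

-- number of appends A's inner loop performs from state 'num' on remaining suffix t
def pvCm (num : Int) : List Int → Nat
  | [] => 0
  | a :: t => if num * num = a then pvCm a t + 1 else pvCm num t

-- the membership square chain: number of successful 'y in cnt' tests starting at y, over list membership
def pvMch (l : List Int) : Nat → Int → Nat
  | 0, _ => 0
  | fuel + 1, y => if y ∈ l then pvMch l fuel (y * y) + 1 else 0

-- A's per-start value
def pvVal (x : Int) (rest : List Int) : Int :=
  if 1 ≤ pvCm x rest then 1 + (pvCm x rest : Int) else -1

-- max of A's per-start values over all suffixes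
def pvBA : List Int → Int
  | [] => -1
  | x :: rest => max (pvVal x rest) (pvBA rest)

lemma pvInnerA_length (t : List Int) : ∀ num rs, (pvInnerA num rs t).length = rs.length + pvCm num t := by
  induction t with
  | nil => intro num rs; simp [pvInnerA, pvCm]
  | cons a t ih =>
    intro num rs
    simp only [pvInnerA, pvCm]
    by_cases h : num * num = a
    · simp [h, ih]; omega
    · simp [h, ih]

lemma pvBA_ge (t : List Int) : -1 ≤ pvBA t := by
  induction t with
  | nil => simp [pvBA]
  | cons x rest ih => simp only [pvBA]; omega

lemma pvOuterA_eq (t : List Int) : ∀ m, -1 ≤ m → pvOuterA t m = max m (pvBA t) := by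
  induction t with
  | nil => intro m hm; simp [pvOuterA, pvBA]; omega
  | cons x rest ih =>
    intro m hm
    simp only [pvOuterA, pvBA]
    rw [pvInnerA_length]
    have h1 : ((List.length [x] + pvCm x rest : Nat) : Int) = 1 + (pvCm x rest : Int) := by
      push_cast; simp
    rw [h1]
    rw [ih _ (by split_ifs <;> omega)]
    simp only [pvVal]
    split_ifs <;> omega

-- pvCm at the self-square starts
lemma pvCm_zero (t : List Int) : pvCm 0 t = t.count 0 := by
  induction t with
  | nil => simp [pvCm]
  | cons a t ih =>
    simp only [pvCm, List.count_cons]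
    by_cases h : a = 0
    · subst h; simp [ih]
    · simp [h, Ne.symm h, ih]

lemma pvCm_one (t : List Int) : pvCm 1 t = t.count 1 := by
  induction t with
  | nil => simp [pvCm]
  | cons a t ih =>
    simp only [pvCm, List.count_cons]
    by_cases h : a = 1
    · subst h; simp [ih]
    · simp [h, Ne.symm h, ih]

lemma pvCm_negone (t : List Int) : pvCm (-1) t = if 1 ∈ t then t.count 1 else 0 := by
  induction t with
  | nil => simp [pvCm]
  | cons a t ih =>
    simp only [pvCm, List.count_cons, List.mem_cons]
    by_cases h : a = 1
    · subst h; simp [pvCm_one]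
    · have : ¬ ((-1 : Int) * -1 = a) := by omega
      simp [h, Ne.symm h, ih]


-- if no element equals num*num through a prefix, pvCm passes it unchanged
lemma pvCm_append_of_no_match (u : List Int) (num : Int) (h : ∀ a ∈ u, num * num ≠ a) :
    ∀ w, pvCm num (u ++ w) = pvCm num w := by
  induction u with
  | nil => simp
  | cons a u ih =>
    intro w
    have ha : num * num ≠ a := h a (by simp)
    simp only [List.cons_append, pvCm, if_neg ha]
    exact ih (fun a ha' => h a (by simp [ha'])) w

lemma pvCm_of_no_match (u : List Int) (num : Int) (h : ∀ a ∈ u, num * num ≠ a) :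
    pvCm num u = 0 := by
  have := pvCm_append_of_no_match u num h []
  simpa [pvCm] using this

-- pvMch only looks at membership of values ≥ its argument (which is ≥ 2)
lemma pvMch_congr (l l' : List Int) : ∀ fuel z, 2 ≤ z → (∀ w, z ≤ w → (w ∈ l ↔ w ∈ l')) →
    pvMch l fuel z = pvMch l' fuel z := by
  intro fuel
  induction fuel with
  | zero => intro z _ _; simp [pvMch]
  | succ f ih =>
    intro z hz hmem
    simp only [pvMch]
    have hzz : (z ∈ l) ↔ (z ∈ l') := hmem z le_rfl
    by_cases h : z ∈ l
    · rw [if_pos h, if_pos (hzz.mp h)]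
      have h2 : 2 ≤ z * z := by nlinarith
      rw [ih (z * z) h2 (fun w hw => hmem w (by nlinarith))]
    · rw [if_neg h, if_neg (fun h' => h (hzz.mpr h'))]

-- distinct elements of l that are ≥ z
def pvD (l : List Int) (z : Int) : Nat := ((PySem.Set.ofList l).filter (fun w => z ≤ w)).length

lemma pvD_lt_of_mem (l : List Int) (z : Int) (hz : z ∈ l) (hlt : z < z * z) :
    pvD l (z * z) < pvD l z := by
  have hsub : ((PySem.Set.ofList l).filter (fun w => z * z ≤ w)).Sublist
      ((PySem.Set.ofList l).filter (fun w => z ≤ w)) :=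
    List.monotone_filter_right _ (fun a h => by simp at h ⊢; omega)
  have hzmem : z ∈ (PySem.Set.ofList l).filter (fun w => z ≤ w) := by
    simp [List.mem_filter, PySem.Set.mem_ofList, hz]
  have hznot : z ∉ (PySem.Set.ofList l).filter (fun w => z * z ≤ w) := by
    simp only [List.mem_filter]
    intro h
    have := h.2
    simp at this
    omega
  unfold pvD
  rcases Nat.lt_or_ge ((PySem.Set.ofList l).filter (fun w => z * z ≤ w)).length
      ((PySem.Set.ofList l).filter (fun w => z ≤ w)).length with h | h
  · exact h
  · exact absurd (hsub.eq_of_length_le h ▸ hzmem) hznot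

-- fuel does not matter once it exceeds pvD
lemma pvMch_fuel (l : List Int) : ∀ f f' z, 2 ≤ z → pvD l z < f → pvD l z < f' →
    pvMch l f z = pvMch l f' z := by
  intro f
  induction f with
  | zero => intro f' z _ h _; omega
  | succ f ih =>
    intro f' z hz hf hf'
    match f', hf' with
    | f' + 1, _ =>
      simp only [pvMch]
      by_cases h : z ∈ l
      · rw [if_pos h, if_pos h]
        have hlt : z < z * z := by nlinarith
        have hd := pvD_lt_of_mem l z h hlt
        have h2 : 2 ≤ z * z := by nlinarith
        rw [ih f' (z * z) h2 (by omega) (by omega)]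
      · rw [if_neg h, if_neg h]

-- main characterization of A's inner count for |x| ≥ 2 on a sorted suffix
lemma pvCm_eq_mch : ∀ n (t : List Int), t.length ≤ n → t.Pairwise (· ≤ ·) →
    ∀ x : Int, 2 ≤ x * x → ∀ fuel, t.length + 1 ≤ fuel →
    pvCm x t = pvMch t fuel (x * x) := by
  intro n
  induction n with
  | zero =>
    intro t ht _ x _ fuel hf
    have : t = [] := List.length_eq_zero_iff.mp (by omega)
    subst this
    match fuel, hf with
    | fuel + 1, _ => simp [pvCm, pvMch]
  | succ n ih =>
    intro t htlen hp x hx2 fuel hfuel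
    match fuel, hfuel with
    | fuel + 1, hfuel =>
      by_cases hx : x * x ∈ t
      · obtain ⟨u, v, ht, hu⟩ := List.eq_append_cons_of_mem hx
        subst ht
        have hulen : u.length + v.length + 1 = u.length + 1 + v.length := by omega
        have htl : (u ++ x * x :: v).length = u.length + 1 + v.length := by
          simp; omega
        -- left side
        have hL : pvCm x (u ++ x * x :: v) = pvCm (x * x) v + 1 := by
          rw [pvCm_append_of_no_match u x (fun a ha h => hu (h ▸ ha))]
          simp [pvCm]
        -- right side
        have hR : pvMch (u ++ x * x :: v) (fuel + 1) (x * x)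
            = pvMch (u ++ x * x :: v) fuel ((x * x) * (x * x)) + 1 := by
          simp [pvMch, hx]
        rw [hL, hR]
        -- v is sorted and shorter
        have hvp : v.Pairwise (· ≤ ·) :=
          hp.sublist ((List.sublist_cons_self _ _).trans (List.sublist_append_right u _))
        have hupair := (List.pairwise_append.mp hp)
        have hule : ∀ a ∈ u, a ≤ x * x := fun a ha => hupair.2.2 a ha (x * x) (by simp)
        have hxx2 : 2 ≤ (x * x) * (x * x) := by nlinarith
        have hxxlt : x * x < (x * x) * (x * x) := by nlinarith
        have hvlen : v.length + 1 ≤ fuel := by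
          simp at htlen hfuel; omega
        have hIH := ih v (by simp at htlen; omega) hvp (x * x) hxx2 fuel hvlen
        rw [hIH]
        congr 1
        refine pvMch_congr v (u ++ x * x :: v) fuel ((x * x) * (x * x)) hxx2 (fun w hw => ?_)
        constructor
        · intro h; simp [h]
        · intro h
          rcases List.mem_append.mp h with h | h
          · exact absurd (hule w h) (by omega)
          · rcases List.mem_cons.mp h with h | h
            · omega
            · exact h
      · rw [pvCm_of_no_match t x (fun a ha h => hx (h ▸ ha))]
        simp [pvMch, hx]

-- pvWhileB is pvMch over the dict's key membership
lemma pvWhileB_eq (cnt : PySem.Dict Int Int) (l : List Int)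
    (hmem : ∀ w, cnt.contains w = true ↔ w ∈ l) :
    ∀ fuel len y, pvWhileB cnt fuel len y = len + (pvMch l fuel y : Int) := by
  intro fuel
  induction fuel with
  | zero => intro len y; simp [pvWhileB, pvMch]
  | succ f ih =>
    intro len y
    simp only [pvWhileB, pvMch]
    by_cases h : y ∈ l
    · rw [if_pos ((hmem y).mpr h), if_pos h, ih]; push_cast; ring
    · rw [if_neg (by simp [hmem y, h]), if_neg h]; simp

-- B's per-key candidate value, in closed form over the input list
def pvCandB (rb : List Int) (x : Int) : Int :=
  if -1 ≤ x ∧ x ≤ 1 then -1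
  else if 2 ≤ 1 + (pvMch rb ((PySem.Set.ofList rb).length) (x * x) : Int) then
    1 + (pvMch rb ((PySem.Set.ofList rb).length) (x * x) : Int)
  else -1

-- max of B's per-key candidates
def pvMB (rb : List Int) : Int :=
  (PySem.Set.ofList rb).foldl (fun b x => max b (pvCandB rb x)) (-1)

-- B's first three candidates (counts of 0, 1, and the -1 → 1 chain)
def pvB3 (rb : List Int) : Int :=
  max (max (max (-1) (if 2 ≤ (rb.count 0 : Int) then (rb.count 0 : Int) else -1))
           (if 2 ≤ (rb.count 1 : Int) then (rb.count 1 : Int) else -1))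
      (if (-1) ∈ rb ∧ 1 ≤ (rb.count 1 : Int) then 1 + (rb.count 1 : Int) else -1)

lemma pvCandB_ge (rb : List Int) (x : Int) : -1 ≤ pvCandB rb x := by
  unfold pvCandB; split_ifs <;> omega

lemma pvB3_ge (rb : List Int) : -1 ≤ pvB3 rb := by
  unfold pvB3; split_ifs <;> omega

lemma pvFoldl_maxg (g : Int → Int) (hg : ∀ x, -1 ≤ g x) (l : List Int) (b : Int) (hb : -1 ≤ b) :
    l.foldl (fun b x => max b (g x)) b = max b (l.foldl (fun b x => max b (g x)) (-1)) := by
  induction l generalizing b with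
  | nil => simp; omega
  | cons a l ih =>
    simp only [List.foldl_cons]
    rw [ih (max b (g a)) (by omega), ih (max (-1) (g a)) (by omega)]
    have := hg a
    omega

lemma pvFoldl_body (f : Int → Int → Int) (g : Int → Int) (hg : ∀ x, -1 ≤ g x)
    (hfg : ∀ b x, -1 ≤ b → f b x = max b (g x)) (l : List Int) (b : Int) (hb : -1 ≤ b) :
    l.foldl f b = max b (l.foldl (fun b x => max b (g x)) (-1)) := by
  induction l generalizing b with
  | nil => simp; omega
  | cons a l ih =>
    simp only [List.foldl_cons]
    rw [hfg b a hb, ih (max b (g a)) (by omega),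
      pvFoldl_maxg g hg l (max (-1) (g a)) (by omega)]
    have := hg a
    omega

lemma pvFoldl_maxg_le (g : Int → Int) (bound : Int) (l : List Int) (b : Int)
    (hb : b ≤ bound) (hl : ∀ x ∈ l, g x ≤ bound) :
    l.foldl (fun b x => max b (g x)) b ≤ bound := by
  induction l generalizing b with
  | nil => simpa
  | cons a l ih =>
    simp only [List.foldl_cons]
    exact ih (max b (g a)) (by have := hl a (by simp); omega) (fun x hx => hl x (by simp [hx]))

lemma pvContains_counter_mem (rb : List Int) (w : Int) :
    (PySem.Dict.counter rb).contains w = true ↔ w ∈ rb := by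
  rw [PySem.Dict.contains_counter]
  exact List.contains_iff_mem

-- B's port in closed form
lemma pvAlt_norm (rb : List Int) : maxSetSize_alt rb = max (pvB3 rb) (pvMB rb) := by
  unfold maxSetSize_alt
  simp only [PySem.Dict.foldl_insert_getD_add_one_eq_counter, PySem.Dict.keys_counter,
    PySem.Dict.getD_counter, PySem.Dict.contains_counter]
  rw [pvFoldl_body _ (pvCandB rb) (pvCandB_ge rb) ?hfg (PySem.Set.ofList rb) _ ?hb]
  case hfg =>
    intro b x hb
    rw [pvWhileB_eq (PySem.Dict.counter rb) rb (pvContains_counter_mem rb)]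
    unfold pvCandB
    split_ifs <;> omega
  case hb => split_ifs <;> omega
  have hB3 : (if List.contains rb (-1) = true ∧ 1 ≤ (rb.count 1 : Int) then
        max (if 2 ≤ (rb.count 1 : Int) then
              max (if 2 ≤ (rb.count 0 : Int) then max (-1) (rb.count 0 : Int) else -1) (rb.count 1 : Int)
            else if 2 ≤ (rb.count 0 : Int) then max (-1) (rb.count 0 : Int) else -1)
          (1 + (rb.count 1 : Int))
      else if 2 ≤ (rb.count 1 : Int) then
        max (if 2 ≤ (rb.count 0 : Int) then max (-1) (rb.count 0 : Int) else -1) (rb.count 1 : Int)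
      else if 2 ≤ (rb.count 0 : Int) then max (-1) (rb.count 0 : Int) else -1) = pvB3 rb := by
    simp only [List.contains_iff_mem]
    unfold pvB3
    split_ifs <;> omega
  rw [hB3]
  rfl

-- the length of set(xs) is at most the length of xs
lemma pvFoldl_add_len (l : List Int) : ∀ s : PySem.Set Int,
    (l.foldl PySem.Set.add s).length ≤ s.length + l.length := by
  induction l with
  | nil => intro s; simp
  | cons a l ih =>
    intro s
    simp only [List.foldl_cons]
    have h1 : (PySem.Set.add s a).length ≤ s.length + 1 := by
      unfold PySem.Set.add; split <;> simp
    have := ih (PySem.Set.add s a)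
    simp only [List.length_cons]
    omega

lemma pvOfList_len (rb : List Int) : (PySem.Set.ofList rb).length ≤ rb.length := by
  rw [PySem.Set.ofList_eq_foldl]
  have := pvFoldl_add_len rb []
  simpa using this

lemma pvD_le_K (rb : List Int) (z : Int) : pvD rb z ≤ (PySem.Set.ofList rb).length := by
  unfold pvD
  exact List.length_filter_le _ _

-- the central chain lemma: A's inner count on the suffix after x equals B's membership chain
lemma pvCm_suffix (rb u v : List Int) (x : Int)
    (hs : PySem.List.sorted rb (fun y => y) false = u ++ x :: v)
    (hx : x ≤ -2 ∨ 2 ≤ x) :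
    pvCm x v = pvMch rb ((PySem.Set.ofList rb).length) (x * x) := by
  have hperm : (PySem.List.sorted rb (fun y => y) false).Perm rb := PySem.List.sorted_perm rb _ false
  have hpair : (PySem.List.sorted rb (fun y => y) false).Pairwise (fun a b => a ≤ b) :=
    PySem.List.sorted_pairwise rb (fun y => y)
  rw [hs] at hperm hpair
  have hx2 : 2 ≤ x * x := by rcases hx with h | h <;> nlinarith
  have hxlt : x < x * x := by rcases hx with h | h <;> nlinarith
  have hvp : v.Pairwise (· ≤ ·) :=
    hpair.sublist ((List.sublist_cons_self _ _).trans (List.sublist_append_right u _))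
  have hule : ∀ a ∈ u, a ≤ x :=
    fun a ha => (List.pairwise_append.mp hpair).2.2 a ha x (by simp)
  have hxm : x ∈ rb := hperm.mem_iff.mp (by simp)
  have hlen : v.length + 1 ≤ rb.length + 1 := by
    have := hperm.length_eq
    simp at this
    omega
  have h1 : pvCm x v = pvMch v (rb.length + 1) (x * x) :=
    pvCm_eq_mch v.length v le_rfl hvp x hx2 (rb.length + 1) hlen
  have h2 : pvMch v (rb.length + 1) (x * x) = pvMch rb (rb.length + 1) (x * x) := by
    refine pvMch_congr v rb (rb.length + 1) (x * x) hx2 (fun w hw => ?_)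
    constructor
    · intro h
      exact hperm.mem_iff.mp (by simp [h])
    · intro h
      have hw' : w ∈ u ++ x :: v := hperm.mem_iff.mpr h
      rcases List.mem_append.mp hw' with h' | h'
      · exact absurd (hule w h') (by omega)
      · rcases List.mem_cons.mp h' with h' | h'
        · omega
        · exact h'
  have h3 : pvMch rb (rb.length + 1) (x * x) = pvMch rb ((PySem.Set.ofList rb).length) (x * x) := by
    refine pvMch_fuel rb _ _ (x * x) hx2 ?_ ?_
    · have := pvD_le_K rb (x * x)
      have := pvOfList_len rb
      omega
    · have := pvD_lt_of_mem rb x hxm hxlt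
      have := pvD_le_K rb x
      omega
  rw [h1, h2, h3]

-- a per-start value of A is bounded by A's overall maximum
lemma pvVal_le_pvBA (u : List Int) (x : Int) (v : List Int) :
    pvVal x v ≤ pvBA (u ++ x :: v) := by
  induction u with
  | nil => simp only [List.nil_append, pvBA]; omega
  | cons a u ih =>
    simp only [List.cons_append, pvBA]
    omega

-- count bookkeeping for a split of the sorted list
lemma pvCount_split (rb u v : List Int) (x c : Int)
    (hs : PySem.List.sorted rb (fun y => y) false = u ++ x :: v) :
    rb.count c = u.count c + (if x = c then 1 else 0) + v.count c := by
  have hperm : (PySem.List.sorted rb (fun y => y) false).Perm rb := PySem.List.sorted_perm rb _ false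
  rw [hs] at hperm
  rw [← hperm.count_eq]
  simp [List.count_append, List.count_cons]
  split_ifs
  · simp_all
    omega
  · simp_all

-- ===== direction 1: A's maximum is at most B's value =====
lemma pvBA_le_alt (rb : List Int) :
    ∀ (t u : List Int), PySem.List.sorted rb (fun y => y) false = u ++ t →
      pvBA t ≤ maxSetSize_alt rb := by
  intro t
  induction t with
  | nil =>
    intro u _
    rw [pvAlt_norm]
    have := pvB3_ge rb
    simp [pvBA]; omega
  | cons x rest ih =>
    intro u hs
    have hs' : PySem.List.sorted rb (fun y => y) false = (u ++ [x]) ++ rest := by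
      simpa [List.append_assoc] using hs
    have hrest := ih (u ++ [x]) hs'
    simp only [pvBA]
    have hval : pvVal x rest ≤ maxSetSize_alt rb := by
      by_cases hcm : pvCm x rest = 0
      · rw [pvAlt_norm]
        have := pvB3_ge rb
        simp [pvVal, hcm]; omega
      · have hcm1 : 1 ≤ pvCm x rest := by omega
        have hval_eq : pvVal x rest = 1 + (pvCm x rest : Int) := by
          simp [pvVal, hcm1]
        have hxm : x ∈ rb := by
          have hperm : (PySem.List.sorted rb (fun y => y) false).Perm rb :=
            PySem.List.sorted_perm rb _ false
          rw [hs] at hperm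
          exact hperm.mem_iff.mp (by simp)
        by_cases hx0 : x = 0
        · subst hx0
          have hc := pvCount_split rb u rest 0 0 hs
          norm_num at hc
          rw [hval_eq, pvCm_zero, pvAlt_norm]
          rw [pvCm_zero] at hcm1
          have hc0 : 2 ≤ (rb.count 0 : Int) := by omega
          unfold pvB3
          rw [if_pos hc0]
          omega
        · by_cases hx1 : x = 1
          · subst hx1
            have hc := pvCount_split rb u rest 1 1 hs
            norm_num at hc
            rw [hval_eq, pvCm_one, pvAlt_norm]
            rw [pvCm_one] at hcm1
            have hc1 : 2 ≤ (rb.count 1 : Int) := by omega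
            unfold pvB3
            rw [if_pos hc1]
            omega
          · by_cases hxn1 : x = -1
            · subst hxn1
              have hc := pvCount_split rb u rest (-1) 1 hs
              norm_num at hc
              rw [pvCm_negone] at hval_eq hcm1
              by_cases h1r : 1 ∈ rest
              · rw [if_pos h1r] at hval_eq
                have hvc : 1 ≤ rest.count 1 := List.count_pos_iff.mpr h1r
                have hc1 : 1 ≤ (rb.count 1 : Int) := by omega
                rw [hval_eq, pvAlt_norm]
                unfold pvB3
                rw [if_pos (And.intro hxm hc1)]
                omega
              · rw [if_neg h1r] at hcm1
                omega
            · have hx : x ≤ -2 ∨ 2 ≤ x := by omega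
              have hchain := pvCm_suffix rb u rest x hs hx
              rw [hval_eq, hchain, pvAlt_norm]
              have hcand : pvCandB rb x = 1 + (pvMch rb ((PySem.Set.ofList rb).length) (x * x) : Int) := by
                unfold pvCandB
                rw [if_neg (by omega), ← hchain, if_pos (by omega), hchain]
              have hmem : x ∈ PySem.Set.ofList rb := (PySem.Set.mem_ofList rb x).mpr hxm
              have hle := (PySem.List.le_foldl_max_int (PySem.Set.ofList rb) (pvCandB rb) (-1)).2 x hmem
              rw [hcand] at hle
              unfold pvMB
              omega
    omega

-- ===== direction 2: B's value is at most A's maximum =====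
lemma pvB3_le_pvBA (rb : List Int) :
    pvB3 rb ≤ pvBA (PySem.List.sorted rb (fun y => y) false) := by
  have hBAge := pvBA_ge (PySem.List.sorted rb (fun y => y) false)
  have hZ : 2 ≤ (rb.count 0 : Int) → (rb.count 0 : Int) ≤ pvBA (PySem.List.sorted rb (fun y => y) false) := by
    intro h
    have h0 : (0 : Int) ∈ PySem.List.sorted rb (fun y => y) false := by
      rw [PySem.List.mem_sorted]
      exact List.count_pos_iff.mp (by omega)
    obtain ⟨u, v, hs, hu⟩ := List.eq_append_cons_of_mem h0
    have hc := pvCount_split rb u v 0 0 hs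
    norm_num at hc
    have hcu : u.count 0 = 0 := List.count_eq_zero.mpr hu
    have hval : pvVal 0 v = (rb.count 0 : Int) := by
      unfold pvVal
      rw [pvCm_zero, if_pos (show 1 ≤ v.count 0 by omega)]
      omega
    rw [hs]
    have := pvVal_le_pvBA u 0 v
    omega
  have hO : 2 ≤ (rb.count 1 : Int) → (rb.count 1 : Int) ≤ pvBA (PySem.List.sorted rb (fun y => y) false) := by
    intro h
    have h0 : (1 : Int) ∈ PySem.List.sorted rb (fun y => y) false := by
      rw [PySem.List.mem_sorted]
      exact List.count_pos_iff.mp (by omega)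
    obtain ⟨u, v, hs, hu⟩ := List.eq_append_cons_of_mem h0
    have hc := pvCount_split rb u v 1 1 hs
    norm_num at hc
    have hcu : u.count 1 = 0 := List.count_eq_zero.mpr hu
    have hval : pvVal 1 v = (rb.count 1 : Int) := by
      unfold pvVal
      rw [pvCm_one, if_pos (show 1 ≤ v.count 1 by omega)]
      omega
    rw [hs]
    have := pvVal_le_pvBA u 1 v
    omega
  have hM : (-1 : Int) ∈ rb → 1 ≤ (rb.count 1 : Int) →
      1 + (rb.count 1 : Int) ≤ pvBA (PySem.List.sorted rb (fun y => y) false) := by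
    intro hm h1
    have h0 : (-1 : Int) ∈ PySem.List.sorted rb (fun y => y) false := by
      rw [PySem.List.mem_sorted]; exact hm
    obtain ⟨u, v, hs, hu⟩ := List.eq_append_cons_of_mem h0
    have hpair : (PySem.List.sorted rb (fun y => y) false).Pairwise (fun a b => a ≤ b) :=
      PySem.List.sorted_pairwise rb (fun y => y)
    rw [hs] at hpair
    have hule : ∀ a ∈ u, a ≤ -1 :=
      fun a ha => (List.pairwise_append.mp hpair).2.2 a ha (-1) (by simp)
    have h1s : (1 : Int) ∈ PySem.List.sorted rb (fun y => y) false := by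
      rw [PySem.List.mem_sorted]
      exact List.count_pos_iff.mp (by omega)
    have h1v : (1 : Int) ∈ v := by
      rw [hs] at h1s
      rcases List.mem_append.mp h1s with h' | h'
      · exact absurd (hule 1 h') (by omega)
      · rcases List.mem_cons.mp h' with h'' | h''
        · omega
        · exact h''
    have hcu : u.count 1 = 0 := List.count_eq_zero.mpr (fun h' => by have := hule 1 h'; omega)
    have hc := pvCount_split rb u v (-1) 1 hs
    norm_num at hc
    have hval : pvVal (-1) v = 1 + (rb.count 1 : Int) := by
      unfold pvVal
      rw [pvCm_negone, if_pos h1v]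
      have hvc : 1 ≤ v.count 1 := List.count_pos_iff.mpr h1v
      rw [if_pos hvc]
      omega
    rw [hs]
    have := pvVal_le_pvBA u (-1) v
    omega
  have hZ' : (if 2 ≤ (rb.count 0 : Int) then (rb.count 0 : Int) else -1)
      ≤ pvBA (PySem.List.sorted rb (fun y => y) false) := by
    split_ifs with h
    · exact hZ h
    · exact hBAge
  have hO' : (if 2 ≤ (rb.count 1 : Int) then (rb.count 1 : Int) else -1)
      ≤ pvBA (PySem.List.sorted rb (fun y => y) false) := by
    split_ifs with h
    · exact hO h
    · exact hBAge
  have hM' : (if (-1 : Int) ∈ rb ∧ 1 ≤ (rb.count 1 : Int) then 1 + (rb.count 1 : Int) else -1)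
      ≤ pvBA (PySem.List.sorted rb (fun y => y) false) := by
    split_ifs with h
    · exact hM h.1 h.2
    · exact hBAge
  unfold pvB3
  omega

lemma pvMB_le_pvBA (rb : List Int) :
    pvMB rb ≤ pvBA (PySem.List.sorted rb (fun y => y) false) := by
  unfold pvMB
  refine pvFoldl_maxg_le (pvCandB rb) _ (PySem.Set.ofList rb) (-1)
    (pvBA_ge _) (fun x hx => ?_)
  have hxm : x ∈ rb := (PySem.Set.mem_ofList rb x).mp hx
  unfold pvCandB
  split_ifs with hskip hL
  · exact pvBA_ge _
  · have hx' : x ≤ -2 ∨ 2 ≤ x := by omega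
    have h0 : x ∈ PySem.List.sorted rb (fun y => y) false := by
      rw [PySem.List.mem_sorted]; exact hxm
    obtain ⟨u, v, hs, _⟩ := List.eq_append_cons_of_mem h0
    have hchain := pvCm_suffix rb u v x hs hx'
    have hval : pvVal x v = 1 + (pvMch rb ((PySem.Set.ofList rb).length) (x * x) : Int) := by
      unfold pvVal
      rw [hchain, if_pos (by omega)]
    rw [hs]
    have := pvVal_le_pvBA u x v
    omega
  · exact pvBA_ge _

-- ===== VERDICT (by name: the statement is the Claim_ definition above) =====
theorem maxSetSize_spec : Claim_equal_maxSetSize := by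
  intro rb _
  show maxSetSize rb = maxSetSize_alt rb
  unfold maxSetSize
  rw [pvOuterA_eq _ (-1) le_rfl]
  have hge := pvBA_ge (PySem.List.sorted rb (fun y => y) false)
  have h1 : max (-1) (pvBA (PySem.List.sorted rb (fun y => y) false))
      = pvBA (PySem.List.sorted rb (fun y => y) false) := by omega
  rw [h1]
  apply le_antisymm
  · exact pvBA_le_alt rb _ [] rfl
  · rw [pvAlt_norm]
    have := pvB3_le_pvBA rb
    have := pvMB_le_pvBA rb
    omega
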